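-- pv_equiv track=rewrite | github.com/matcom-compilers-2019/cool-compiler | src/parsing/preprocess.py | next_word
-- ===== SOURCE A (Python) =====
-- def next_word(program, idx):
--     i = idx
--     word = ""
--     while i < len(program) and not program[i] in [':',';',',','.','(',')','{','}','[',']','@','<','>','=','-','+',' ','*','/', '\n','\t','~']:
--         word += program[i]
--         i += 1
--     if word == "" and i < len(program):
--         word = program[i]
--         i += 1
--     return word, i
-- ===== SOURCE B (Python) =====
-- DELIMS = frozenset(':;,.(){}[]@<>=-+ */\n\t~')
--
-- def next_word(program, idx):
--     n = len(program)
--     end = next((j for j in range(idx, n) if program[j] in DELIMS), n)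
--     if end > idx:
--         return program[idx:end], end
--     if idx < n:
--         return program[idx], idx + 1
--     return "", idx
-- ===== Notes on version B (the rewrite author's own statement) =====
-- stated objective: faster
-- what changed: Instead of accumulating the word character by character with quadratic string concatenation, B finds the index of the first delimiter at or after idx in one search over range(idx, n) and returns the single slice program[idx:end]; the single-delimiter fallback becomes an explicit early-return chain.
-- outside the precondition, e.g. on next_word('ab', -1): A returns ('bab', 2), B returns ('b', 2)
import Mathlib
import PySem

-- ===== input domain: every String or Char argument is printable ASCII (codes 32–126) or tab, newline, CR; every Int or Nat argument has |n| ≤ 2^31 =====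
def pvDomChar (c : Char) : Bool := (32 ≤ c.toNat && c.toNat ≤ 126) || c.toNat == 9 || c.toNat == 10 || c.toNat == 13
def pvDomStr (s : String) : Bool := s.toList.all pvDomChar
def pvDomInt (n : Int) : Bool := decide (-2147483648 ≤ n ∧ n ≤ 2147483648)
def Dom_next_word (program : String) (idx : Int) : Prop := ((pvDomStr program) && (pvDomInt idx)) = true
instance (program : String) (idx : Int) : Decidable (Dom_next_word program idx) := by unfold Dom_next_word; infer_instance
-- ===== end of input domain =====

-- B replaces A's character-accumulating while loop (quadratic str concatenation) by find-first-delimiter-then-slice, measurably faster in a timing run.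


-- ===== PORT A =====
def nwDelims : List Char :=
  [':', ';', ',', '.', '(', ')', '{', '}', '[', ']', '@', '<', '>', '=', '-', '+', ' ', '*', '/', '\n', '\t', '~']

-- the while loop of A, carried over List Char (PySem strings are lists of code points)
def nwLoop (cs : List Char) (n i : Int) (word : List Char) : List Char × Int :=
  if _h : i < n then
    match PySem.List.pyGet? cs i with
    | some c =>
        if nwDelims.contains c then (word, i)
        else nwLoop cs n (i + 1) (word ++ [c])
    | none => (word, i)   -- Python raises IndexError here (i < -len); outside Pre_
  else (word, i)
termination_by (n - i).toNat
decreasing_by omega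

def next_word (program : String) (idx : Int) : String × Int :=
  match nwLoop program.toList (program.toList.length : Int) idx [] with
  | (word, i) =>
    if word = [] ∧ i < (program.toList.length : Int) then
      match PySem.List.pyGet? program.toList i with
      | some c => (String.ofList [c], i + 1)
      | none => (String.ofList word, i)   -- Python raises IndexError here; outside Pre_
    else (String.ofList word, i)

-- ===== PORT B =====
def nwDelimsAlt : List Char :=
  [':', ';', ',', '.', '(', ')', '{', '}', '[', ']', '@', '<', '>', '=', '-', '+', ' ', '*', '/', '\n', '\t', '~']

-- end = next((j for j in range(idx, n) if program[j] in DELIMS), n)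
def nwFindEnd (cs : List Char) (n idx : Int) : Int :=
  ((PySem.List.pyRange idx n 1).find? (fun j =>
      match PySem.List.pyGet? cs j with
      | some c => nwDelimsAlt.contains c
      | none => false)).getD n

def next_word_alt (program : String) (idx : Int) : String × Int :=
  if nwFindEnd program.toList (program.toList.length : Int) idx > idx then
    (String.ofList (PySem.List.slice program.toList (some idx)
        (some (nwFindEnd program.toList (program.toList.length : Int) idx))),
     nwFindEnd program.toList (program.toList.length : Int) idx)
  else if idx < (program.toList.length : Int) then
    match PySem.List.pyGet? program.toList idx with
    | some c => (String.ofList [c], idx + 1)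
    | none => ("", idx)   -- unreachable for 0 ≤ idx < n
  else ("", idx)

-- ===== PRECONDITION & SPEC =====
-- Pre_ restricts to the function's natural domain 0 ≤ idx: a negative idx is a malformed scan
-- position on which A's returned value (for -len ≤ idx < 0) is an accident of Python
-- negative-index wraparound, and A raises IndexError for idx < -len.
def Pre_next_word (program : String) (idx : Int) : Prop := 0 ≤ idx
instance (program : String) (idx : Int) : Decidable (Pre_next_word program idx) := by unfold Pre_next_word; infer_instance

def pvWitness_next_word : String × Int := ("class A;", 0)

def Spec_next_word (program : String) (idx : Int) (out : String × Int) : Prop := out = next_word_alt program idx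
instance (program : String) (idx : Int) (out : String × Int) : Decidable (Spec_next_word program idx out) := by unfold Spec_next_word; infer_instance

-- ===== CLAIM (what is proved, stated in full; the proofs are below) =====
def Claim_equal_next_word : Prop := ∀ (program : String) (idx : Int), Dom_next_word program idx → Pre_next_word program idx → Spec_next_word program idx (next_word program idx)

-- ===== LEMMAS AND PROOFS =====

theorem nwFindEnd_bounds (cs : List Char) (n a : Int) (ha : a ≤ n) :
    a ≤ nwFindEnd cs n a ∧ nwFindEnd cs n a ≤ n := by
  unfold nwFindEnd
  cases hf : (PySem.List.pyRange a n 1).find? (fun j =>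
      match PySem.List.pyGet? cs j with
      | some c => nwDelimsAlt.contains c
      | none => false) with
  | none => simp only [Option.getD_none]; omega
  | some j =>
      have hj := List.mem_of_find?_eq_some hf
      rw [PySem.List.mem_pyRange_one] at hj
      simp only [Option.getD_some]; omega

theorem slice_cons_of_lt (cs : List Char) (i e : Int) (h0 : 0 ≤ i) (hi : i.toNat < cs.length)
    (hie : i < e) :
    PySem.List.slice cs (some i) (some e) = cs[i.toNat] :: PySem.List.slice cs (some (i + 1)) (some e) := by
  rw [PySem.List.slice_toNat _ h0 (by omega), PySem.List.slice_toNat _ (by omega) (by omega)]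
  rw [show (i + 1).toNat = i.toNat + 1 from by omega]
  rw [List.drop_eq_getElem_cons hi]
  rw [show e.toNat - i.toNat = (e.toNat - (i.toNat + 1)) + 1 from by omega, List.take_succ_cons]

-- A's loop = "find the first delimiter position, slice up to it"
theorem nwLoop_eq_slice (cs : List Char) (i : Int) (word : List Char)
    (h0 : 0 ≤ i) (hn : i ≤ (cs.length : Int)) :
    nwLoop cs (cs.length : Int) i word =
      (word ++ PySem.List.slice cs (some i) (some (nwFindEnd cs (cs.length : Int) i)),
       nwFindEnd cs (cs.length : Int) i) := by
  generalize hk : ((cs.length : Int) - i).toNat = k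
  induction k generalizing i word with
  | zero =>
      have hi : i = (cs.length : Int) := by omega
      rw [nwLoop]
      have he : nwFindEnd cs (cs.length : Int) i = i := by
        unfold nwFindEnd
        rw [PySem.List.pyRange_one_eq_nil (by omega)]
        simp [hi]
      rw [he, PySem.List.slice_toNat _ h0 h0]
      simp [hi]
  | succ k ih =>
      have hilt : i < (cs.length : Int) := by omega
      have hget : PySem.List.pyGet? cs i = some cs[i.toNat] :=
        PySem.List.pyGet?_eq_some_getElem cs h0 (by simpa using hilt)
      rw [nwLoop, dif_pos hilt, hget]
      dsimp only
      have hcons : PySem.List.pyRange i (cs.length : Int) 1 =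
          i :: PySem.List.pyRange (i + 1) (cs.length : Int) 1 :=
        PySem.List.pyRange_one_cons hilt
      by_cases hd : nwDelims.contains cs[i.toNat]
      · rw [if_pos hd]
        have he : nwFindEnd cs (cs.length : Int) i = i := by
          unfold nwFindEnd
          rw [hcons, List.find?_cons]
          simp only [hget]
          have hd' : cs[i.toNat] ∈ nwDelimsAlt := by
            simpa [nwDelimsAlt, nwDelims] using hd
          simp [hd']
        rw [he]
        simp [PySem.List.slice_toNat _ h0 h0]
      · rw [if_neg hd]
        have he : nwFindEnd cs (cs.length : Int) i = nwFindEnd cs (cs.length : Int) (i + 1) := by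
          unfold nwFindEnd
          rw [hcons, List.find?_cons]
          simp only [hget]
          have hd' : cs[i.toNat] ∉ nwDelimsAlt := by
            simpa [nwDelimsAlt, nwDelims] using hd
          simp [hd']
        have hb := nwFindEnd_bounds cs (cs.length : Int) (i + 1) (by omega)
        rw [he, ih (i + 1) (word ++ [cs[i.toNat]]) (by omega) (by omega) (by omega)]
        rw [slice_cons_of_lt cs i _ h0 (by omega) (by omega)]
        simp

-- ===== VERDICT (by name: the statement is the Claim_ definition above) =====
theorem next_word_spec : Claim_equal_next_word := by
  intro program idx _hdom hpre
  unfold Spec_next_word next_word next_word_alt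
  have hpre' : (0 : Int) ≤ idx := hpre
  set cs := program.toList with hcs
  by_cases hlt : idx < (cs.length : Int)
  · have hloop := nwLoop_eq_slice cs idx [] hpre' (by omega)
    rw [hloop]
    have hb := nwFindEnd_bounds cs (cs.length : Int) idx (by omega)
    set e := nwFindEnd cs (cs.length : Int) idx with he
    by_cases heq : e = idx
    · -- empty word: fall back to the single character
      have hsl : PySem.List.slice cs (some idx) (some e) = [] := by
        rw [heq, PySem.List.slice_toNat _ hpre' hpre']
        simp
      rw [hsl, heq]
      simp [hlt]
    · -- nonempty word
      have hgt : e > idx := by omega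
      have hsl : PySem.List.slice cs (some idx) (some e) ≠ [] := by
        rw [PySem.List.slice_toNat _ hpre' (by omega)]
        intro hnil
        have := congrArg List.length hnil
        simp at this
        omega
      simp [hsl, hgt]
  · -- idx ≥ len(program): both return ("", idx)
    have he : nwFindEnd cs (cs.length : Int) idx = (cs.length : Int) := by
      unfold nwFindEnd
      rw [PySem.List.pyRange_one_eq_nil (by omega)]
      rfl
    rw [nwLoop, dif_neg hlt, he]
    simp [hlt]
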